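-- pv_equiv track=rewrite | github.com/zidelmal/gender-detection-webapp | prediction/prediction.py | respell
-- ===== SOURCE A (Python) =====
-- def respell(s):
--     respellings = {
--                 '|': 'A',
--                 "'": '',
--                 'p': 'a',
--                 "Y": 'a',
--                 '<': 'I',
--                 '$': 'sh',
--                 '>': 'A',
--                 '*': 'd',
--                 '~': "",
--                 '}': "",
--                 '&': 'a',
--                 'Z': 'T'
--                 }
--     for wrong in respellings:
--         try:
--             index = s.index(wrong)
--             s = s[:index] + respellings[wrong] + s[len(wrong)+index:]
--         except:
--             pass
--     return ''.join(s)
-- ===== SOURCE B (Python) =====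
-- def respell(s):
--     respellings = {
--                 '|': 'A',
--                 "'": '',
--                 'p': 'a',
--                 "Y": 'a',
--                 '<': 'I',
--                 '$': 'sh',
--                 '>': 'A',
--                 '*': 'd',
--                 '~': "",
--                 '}': "",
--                 '&': 'a',
--                 'Z': 'T'
--                 }
--     first = {}
--     for i, c in enumerate(s):
--         if c in respellings and c not in first:
--             first[c] = i
--     return ''.join(respellings[c] if first.get(c) == i else c
--                    for i, c in enumerate(s))
-- ===== Notes on version B (the rewrite author's own statement) =====
-- stated objective: alternative
-- what changed: Replaces A's 12 sequential index-scan-and-slice rewrites of the string by a two-stage positional algorithm: one pass records the first-occurrence index of each replaceable character, then one positional pass substitutes exactly at those recorded indices; correct because keys are distinct and no replacement value contains a key character.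
import Mathlib
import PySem

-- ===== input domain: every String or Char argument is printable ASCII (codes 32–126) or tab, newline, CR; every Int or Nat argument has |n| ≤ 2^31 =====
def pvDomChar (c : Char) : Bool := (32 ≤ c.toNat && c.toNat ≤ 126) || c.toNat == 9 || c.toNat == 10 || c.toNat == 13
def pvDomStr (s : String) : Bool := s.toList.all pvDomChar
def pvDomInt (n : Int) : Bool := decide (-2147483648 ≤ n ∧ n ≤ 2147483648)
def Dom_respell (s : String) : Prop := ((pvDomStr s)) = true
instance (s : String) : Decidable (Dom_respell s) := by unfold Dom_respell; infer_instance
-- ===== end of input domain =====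

-- B replaces A's 12 sequential index-scan-and-slice rewrites by a two-stage positional
-- algorithm (record first-occurrence indices, then substitute by position); same return
-- value (objective: alternative).

-- ===== PORT A =====
-- the dict literal, in insertion order
def respellTable : List (Char × String) :=
  [('|', "A"), ('\'', ""), ('p', "a"), ('Y', "a"), ('<', "I"), ('$', "sh"),
   ('>', "A"), ('*', "d"), ('~', ""), ('}', ""), ('&', "a"), ('Z', "T")]

-- one iteration of A's loop: try index = s.index(wrong); s = s[:index] + v + s[len(wrong)+index:]
def respellStep (cs : List Char) (kv : Char × String) : List Char :=
  match PySem.List.index? cs kv.1 with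
  | some i =>
      PySem.List.slice cs none (some (i : Int)) ++ kv.2.toList
        ++ PySem.List.slice cs (some ((1 : Int) + (i : Int))) none
  | none => cs

def respell (s : String) : String :=
  String.ofList (List.foldl respellStep s.toList respellTable)

-- ===== PORT B =====
def respellDict : PySem.Dict Char String := PySem.Dict.ofList
  [('|', "A"), ('\'', ""), ('p', "a"), ('Y', "a"), ('<', "I"), ('$', "sh"),
   ('>', "A"), ('*', "d"), ('~', ""), ('}', ""), ('&', "a"), ('Z', "T")]

-- pass 1 body: if c in respellings and c not in first: first[c] = i
def respellFirstStep (d : PySem.Dict Char Int) (ic : Int × Char) : PySem.Dict Char Int :=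
  if respellDict.contains ic.2 && !(d.contains ic.2) then d.insert ic.2 ic.1 else d

-- pass 2: ''.join(respellings[c] if first.get(c) == i else c for i, c in enumerate(s))
def respell_alt (s : String) : String :=
  let first := (PySem.List.enumerate s.toList).foldl respellFirstStep PySem.Dict.empty
  String.ofList
    (((PySem.List.enumerate s.toList).map
      (fun ic => if first.get? ic.2 = some ic.1
                 then (respellDict.getD ic.2 (String.ofList [ic.2])).toList
                 else [ic.2])).flatten)

-- ===== PRECONDITION & SPEC =====
def Spec_respell (s : String) (out : String) : Prop := out = respell_alt s
instance (s : String) (out : String) : Decidable (Spec_respell s out) := by unfold Spec_respell; infer_instance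

-- ===== CLAIM (what is proved, stated in full; the proofs are below) =====
def Claim_equal_respell : Prop := ∀ (s : String), Dom_respell s → Spec_respell s (respell s)

-- ===== LEMMAS AND PROOFS =====

-- common specification: for each pending key, replace its first occurrence by its value
def goSpec : List (Char × String) → List Char → List Char
  | _, [] => []
  | kvs, c :: t =>
      match kvs.lookup c with
      | some v => v.toList ++ goSpec (kvs.eraseP (fun kv => kv.1 == c)) t
      | none => c :: goSpec kvs t

theorem lookup_cons_ne {c k : Char} {v : String} {kvs : List (Char × String)} (h : c ≠ k) :
    ((k, v) :: kvs).lookup c = kvs.lookup c := by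
  rw [List.lookup, show (c == k) = false from beq_eq_false_iff_ne.mpr h]

theorem lookup_cons_self {c : Char} {v : String} {kvs : List (Char × String)} :
    ((c, v) :: kvs).lookup c = some v := by
  rw [List.lookup, beq_self_eq_true]

theorem lookup_eq_none_of_not_mem {kvs : List (Char × String)} {c : Char}
    (h : c ∉ kvs.map Prod.fst) : kvs.lookup c = none := by
  induction kvs with
  | nil => rfl
  | cons kv kvs ih =>
    simp only [List.map_cons, List.mem_cons, not_or] at h
    cases kv with
    | mk k v =>
      rw [lookup_cons_ne h.1]
      exact ih h.2

theorem goSpec_nil (cs : List Char) : goSpec [] cs = cs := by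
  induction cs with
  | nil => rfl
  | cons c t ih => simp [goSpec, List.lookup, ih]

theorem goSpec_append_no_keys (kvs : List (Char × String)) (v t : List Char)
    (h : ∀ c ∈ v, c ∉ kvs.map Prod.fst) :
    goSpec kvs (v ++ t) = v ++ goSpec kvs t := by
  induction v with
  | nil => rfl
  | cons c v ih =>
    have hc := h c (by simp)
    simp only [List.cons_append, goSpec, lookup_eq_none_of_not_mem hc]
    rw [ih (fun x hx => h x (by simp [hx]))]

theorem respellStep_nil (kv : Char × String) : respellStep [] kv = [] := by
  simp [respellStep, PySem.List.index?]

theorem respellStep_cons_self (k : Char) (v : String) (t : List Char) :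
    respellStep (k :: t) (k, v) = v.toList ++ t := by
  unfold respellStep
  rw [PySem.List.index?_cons_self]
  have h1 : PySem.List.slice (k :: t) none (some ((0 : Nat) : Int)) = [] := by
    rw [PySem.List.slice_to _ (by norm_num)]; simp
  have h2 : PySem.List.slice (k :: t) (some ((1 : Int) + ((0 : Nat) : Int))) none = t := by
    rw [PySem.List.slice_from _ (by norm_num)]; norm_num
  simp only [h1, h2]
  simp

theorem respellStep_cons_ne {c : Char} {kv : Char × String} (t : List Char) (h : c ≠ kv.1) :
    respellStep (c :: t) kv = c :: respellStep t kv := by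
  unfold respellStep
  simp only [PySem.List.index?_cons_of_ne t h]
  cases hidx : PySem.List.index? t kv.1 with
  | none => simp
  | some i =>
    simp only [Option.map_some]
    have e1 : PySem.List.slice (c :: t) none (some ((i+1 : Nat) : Int)) = c :: PySem.List.slice t none (some (i : Int)) := by
      rw [PySem.List.slice_to _ (by positivity), PySem.List.slice_to _ (by positivity)]
      simp [List.take_succ_cons]
    have e2 : PySem.List.slice (c :: t) (some ((1:Int) + ((i+1 : Nat) : Int))) none = PySem.List.slice t (some ((1:Int) + (i : Int))) none := by
      rw [PySem.List.slice_from _ (by positivity), PySem.List.slice_from _ (by positivity)]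
      have h3 : ((1:Int) + ((i+1 : Nat) : Int)).toNat = ((1:Int) + ((i : Nat) : Int)).toNat + 1 := by omega
      rw [h3, List.drop_succ_cons]
    rw [e1, e2]
    simp

-- side condition: none of the characters of v is a key of kvs
def NoKeysIn (kvs : List (Char × String)) (v : String) : Prop :=
  ∀ c ∈ v.toList, c ∉ kvs.map Prod.fst

-- applying one scan-and-slice pass for (k, v) before the one-pass replacement of kvs
-- equals the one-pass replacement of (k, v) :: kvs
theorem swap_step (k : Char) (v : String) :
    ∀ (t : List Char) (kvs : List (Char × String)),
      k ∉ kvs.map Prod.fst → NoKeysIn kvs v →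
      goSpec kvs (respellStep t (k, v)) = goSpec ((k, v) :: kvs) t := by
  intro t
  induction t with
  | nil => intro kvs _ _; rw [respellStep_nil]; rfl
  | cons c t ih =>
    intro kvs hk hv
    by_cases hck : c = k
    · subst hck
      rw [respellStep_cons_self c v]
      rw [goSpec_append_no_keys kvs v.toList t hv]
      have hl : ((c, v) :: kvs).lookup c = some v := lookup_cons_self
      simp only [goSpec, hl]
      have he : ((c, v) :: kvs).eraseP (fun kv => kv.1 == c) = kvs := by
        simp
      rw [he]
    · rw [respellStep_cons_ne t hck]
      have hsub := (List.eraseP_sublist (l := kvs) (p := fun kv => kv.1 == c)).map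
        (Prod.fst (α := Char) (β := String))
      cases hl : kvs.lookup c with
      | some w =>
        have hl' : ((k, v) :: kvs).lookup c = some w := by rw [lookup_cons_ne hck, hl]
        simp only [goSpec, hl, hl']
        have herase : ((k, v) :: kvs).eraseP (fun kv => kv.1 == c) =
            (k, v) :: kvs.eraseP (fun kv => kv.1 == c) := by
          rw [List.eraseP_cons_of_neg (by simpa using fun h => hck h.symm)]
        rw [herase]
        rw [← ih (kvs.eraseP (fun kv => kv.1 == c))
            (fun hmem => hk (hsub.mem hmem))
            (fun x hx hmem => hv x hx (hsub.mem hmem))]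
      | none =>
        have hl' : ((k, v) :: kvs).lookup c = none := by rw [lookup_cons_ne hck, hl]
        simp only [goSpec, hl, hl']
        rw [ih kvs hk hv]

-- keys distinct, and no value contains any key
def CondT (kvs : List (Char × String)) : Prop :=
  (kvs.map Prod.fst).Nodup ∧ ∀ kv ∈ kvs, ∀ kv' ∈ kvs, kv'.1 ∉ kv.2.toList

theorem foldl_eq_goSpec :
    ∀ (kvs : List (Char × String)) (s : List Char), CondT kvs →
      List.foldl respellStep s kvs = goSpec kvs s := by
  intro kvs
  induction kvs with
  | nil => intro s _; simp [goSpec_nil]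
  | cons kv kvs ih =>
    intro s hc
    obtain ⟨hnd, hval⟩ := hc
    simp only [List.map_cons, List.nodup_cons] at hnd
    simp only [List.foldl_cons]
    rw [ih (respellStep s kv) ⟨hnd.2, fun a ha b hb => hval a (by simp [ha]) b (by simp [hb])⟩]
    have hv : NoKeysIn kvs kv.2 := by
      intro c hc hmem
      obtain ⟨kv', hkv', hfst⟩ := List.mem_map.mp hmem
      exact hval kv (by simp) kv' (by simp [hkv']) (hfst ▸ hc)
    have := swap_step kv.1 kv.2 s kvs hnd.1 hv
    simpa using this

-- ===== B side =====
theorem get?_mk_eq_lookup (l : List (Char × String)) (c : Char) :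
    (PySem.Dict.mk l).get? c = l.lookup c := by
  induction l with
  | nil => simp [PySem.Dict.get?]
  | cons kv l ih =>
    cases kv with
    | mk k v =>
      rw [PySem.Dict.get?_mk_cons]
      by_cases h : c = k
      · subst h; rw [lookup_cons_self, if_pos (by simp)]
      · rw [lookup_cons_ne h, if_neg (by simpa using Ne.symm h), ih]

theorem dict_get?_eq_lookup (c : Char) : respellDict.get? c = respellTable.lookup c := by
  have h : respellDict = PySem.Dict.mk respellTable := by decide
  rw [h, get?_mk_eq_lookup]

theorem lookup_filter_key (p : Char → Bool) (kvs : List (Char × String)) (c : Char) :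
    (kvs.filter (fun kv => p kv.1)).lookup c = if p c then kvs.lookup c else none := by
  induction kvs with
  | nil => simp
  | cons kv kvs ih =>
    cases kv with
    | mk k v =>
      by_cases hp : p k
      · rw [List.filter_cons_of_pos (by simpa using hp)]
        by_cases hck : c = k
        · subst hck; rw [lookup_cons_self, lookup_cons_self, if_pos hp]
        · rw [lookup_cons_ne hck, lookup_cons_ne hck, ih]
      · rw [List.filter_cons_of_neg (by simpa using hp), ih]
        by_cases hpc : p c
        · have hck : c ≠ k := fun h => hp (h ▸ hpc)
          rw [if_pos hpc, if_pos hpc, lookup_cons_ne hck]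
        · rw [if_neg hpc, if_neg hpc]

theorem eraseP_filter_key (p : Char → Bool) (c : Char) :
    ∀ (kvs : List (Char × String)), (kvs.map Prod.fst).Nodup →
      (kvs.filter (fun kv => p kv.1)).eraseP (fun kv => kv.1 == c) =
        kvs.filter (fun kv => p kv.1 && !(kv.1 == c)) := by
  intro kvs
  induction kvs with
  | nil => intro _; rfl
  | cons kv kvs ih =>
    intro hnd
    simp only [List.map_cons, List.nodup_cons] at hnd
    by_cases hp : p kv.1
    · by_cases hck : kv.1 = c
      · rw [List.filter_cons_of_pos (by simpa using hp)]
        rw [List.eraseP_cons_of_pos (by simpa using hck)]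
        rw [List.filter_cons_of_neg (by simp [hck])]
        apply List.filter_congr
        intro kv' hkv'
        have hne : kv'.1 ≠ c := fun h => hnd.1 (by
          rw [hck]
          exact h ▸ List.mem_map.mpr ⟨kv', hkv', rfl⟩)
        simp [hne]
      · rw [List.filter_cons_of_pos (by simpa using hp)]
        rw [List.eraseP_cons_of_neg (by simpa using hck)]
        rw [List.filter_cons_of_pos (by simp [hp, hck])]
        rw [ih hnd.2]
    · rw [List.filter_cons_of_neg (by simpa using hp)]
      rw [List.filter_cons_of_neg (by simp [hp])]
      exact ih hnd.2

theorem tableNodup : (respellTable.map Prod.fst).Nodup := by decide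

-- pass 1: what the first-occurrence dict answers for any character
theorem first_get? :
    ∀ (cs : List Char) (n : Int) (d : PySem.Dict Char Int) (c : Char),
      ((PySem.List.enumerate cs n).foldl respellFirstStep d).get? c =
        match d.get? c with
        | some v => some v
        | none =>
            if respellDict.contains c then
              (PySem.List.index? cs c).map (fun j => n + (j : Int))
            else none := by
  intro cs
  induction cs with
  | nil =>
    intro n d c
    rw [PySem.List.enumerate_nil]
    cases hd : d.get? c with
    | some v => simp [hd]
    | none => simp [hd, PySem.List.index?]
  | cons x t ih =>
    intro n d c
    rw [PySem.List.enumerate_cons, List.foldl_cons, ih]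
    by_cases hcx : c = x
    · subst hcx
      unfold respellFirstStep
      by_cases hkey : respellDict.contains c
      · by_cases hdc : d.contains c
        · rw [if_neg (by simp [hkey, hdc])]
          have : ∃ v, d.get? c = some v := by
            have := PySem.Dict.contains_eq_isSome_get? (d := d) (k := c)
            rw [hdc] at this
            exact Option.isSome_iff_exists.mp this.symm
          obtain ⟨v, hv⟩ := this
          simp [hv]
        · have hdc' : d.contains c = false := by simpa using hdc
          rw [if_pos (by simp [hkey, hdc'])]
          have hd : d.get? c = none := by
            have := PySem.Dict.contains_eq_isSome_get? (d := d) (k := c)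
            rw [hdc'] at this
            cases hg : d.get? c with
            | none => rfl
            | some v => rw [hg] at this; simp at this
          rw [PySem.Dict.get?_insert_self, hd]
          rw [PySem.List.index?_cons_self]
          simp [hkey]
      · rw [if_neg (by simp [hkey])]
        cases hd : d.get? c with
        | some v => simp
        | none => simp [hkey]
    · have hget : (respellFirstStep d (n, x)).get? c = d.get? c := by
        unfold respellFirstStep
        split
        · exact PySem.Dict.get?_insert_of_ne _ _ (by simpa using hcx)
        · rfl
      rw [hget]
      cases hd : d.get? c with
      | some v => simp
      | none =>
        rw [PySem.List.index?_cons_of_ne t (fun h => hcx h.symm)]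
        by_cases hkey : respellDict.contains c
        · rw [if_pos hkey, if_pos hkey]
          cases hidx : PySem.List.index? t c with
          | none => simp
          | some j =>
            simp
            ring_nf
        · rw [if_neg hkey, if_neg hkey]

theorem tableKeys : ∀ kv ∈ respellTable, respellDict.contains kv.1 = true := by decide

theorem get?_some_of_contains {d : PySem.Dict Char String} {c : Char}
    (h : d.contains c = true) : ∃ v, d.get? c = some v := by
  have := PySem.Dict.contains_eq_isSome_get? (d := d) (k := c)
  rw [h] at this
  exact Option.isSome_iff_exists.mp this.symm

theorem get?_none_of_not_contains {d : PySem.Dict Char String} {c : Char}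
    (h : d.contains c = false) : d.get? c = none := by
  have := PySem.Dict.contains_eq_isSome_get? (d := d) (k := c)
  rw [h] at this
  cases hg : d.get? c with
  | none => rfl
  | some v => rw [hg] at this; simp at this

-- pass 2 equals the one-pass replacement of the keys not yet consumed by the prefix
theorem emit_eq_goSpec :
    ∀ (suf pre cs0 : List Char), cs0 = pre ++ suf →
      ((PySem.List.enumerate suf (pre.length : Int)).map
        (fun ic => if ((PySem.List.enumerate cs0 0).foldl respellFirstStep PySem.Dict.empty).get? ic.2 = some ic.1
                   then (respellDict.getD ic.2 (String.ofList [ic.2])).toList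
                   else [ic.2])).flatten
      = goSpec (respellTable.filter (fun kv => !(pre.contains kv.1))) suf := by
  intro suf
  induction suf with
  | nil => intro pre cs0 h; simp [PySem.List.enumerate_nil, goSpec]
  | cons c t ih =>
    intro pre cs0 h
    rw [PySem.List.enumerate_cons, List.map_cons, List.flatten_cons]
    have hF : ((PySem.List.enumerate cs0 0).foldl respellFirstStep PySem.Dict.empty).get? c =
        if respellDict.contains c then (PySem.List.index? cs0 c).map (fun j => (0 : Int) + (j : Int)) else none := by
      rw [first_get?, PySem.Dict.get?_empty]
    have hlen : ((pre.length : Int) + 1) = (((pre ++ [c]).length : Nat) : Int) := by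
      simp
    by_cases hkey : respellDict.contains c
    · by_cases hmem : c ∈ pre
      · -- key already consumed: emit c unchanged
        have hidx : PySem.List.index? cs0 c = PySem.List.index? pre c := by
          rw [h, show pre ++ c :: t = pre ++ (c :: t) from rfl]
          exact PySem.List.index?_append_of_mem _ hmem
        have hcond : ((PySem.List.enumerate cs0 0).foldl respellFirstStep PySem.Dict.empty).get? c ≠ some ((pre.length : Nat) : Int) := by
          rw [hF, if_pos hkey, hidx]
          cases hj : PySem.List.index? pre c with
          | none =>
            rw [PySem.List.index?_eq_none_iff] at hj
            exact absurd hmem hj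
          | some j =>
            obtain ⟨hjlt, -, -⟩ := PySem.List.getElem_of_index?_eq_some hj
            simp
            omega
        rw [if_neg hcond]
        have hpc : pre.contains c = true := by simpa using hmem
        have hlk : (respellTable.filter (fun kv => !(pre.contains kv.1))).lookup c = none := by
          rw [lookup_filter_key (fun x => !(pre.contains x)) respellTable c, hpc]
          simp
        simp only [goSpec, hlk]
        rw [List.singleton_append]
        congr 1
        rw [hlen, ih (pre ++ [c]) cs0 (by rw [h]; simp)]
        congr 1
        apply List.filter_congr
        intro kv _
        by_cases hkc : kv.1 = c
        · simp [hkc]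
          exact hmem
        · simp [hkc]
      · -- first occurrence of a key: substitute
        have hidx : PySem.List.index? cs0 c = some pre.length := by
          rw [h, PySem.List.index?_eq_some_iff]
          exact ⟨pre, t, rfl, rfl, hmem⟩
        have hcond : ((PySem.List.enumerate cs0 0).foldl respellFirstStep PySem.Dict.empty).get? c = some ((pre.length : Nat) : Int) := by
          rw [hF, if_pos hkey, hidx]
          simp
        rw [if_pos hcond]
        obtain ⟨v, hv⟩ := get?_some_of_contains hkey
        have hgetD : respellDict.getD c (String.ofList [c]) = v := PySem.Dict.getD_of_get?_eq_some _ _ hv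
        have hlkv : respellTable.lookup c = some v := by rw [← dict_get?_eq_lookup, hv]
        have hpc : pre.contains c = false := by simpa using hmem
        have hlk : (respellTable.filter (fun kv => !(pre.contains kv.1))).lookup c = some v := by
          rw [lookup_filter_key (fun x => !(pre.contains x)) respellTable c, hpc]
          simpa using hlkv
        simp only [goSpec, hlk]
        rw [hgetD]
        congr 1
        rw [eraseP_filter_key (fun x => !(pre.contains x)) c respellTable tableNodup]
        rw [hlen, ih (pre ++ [c]) cs0 (by rw [h]; simp)]
        congr 1
        apply List.filter_congr
        intro kv _
        by_cases hkc : kv.1 = c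
        · simp [hkc]
        · simp [hkc]
    · -- not a key: emit unchanged, table untouched
      have hcond : ((PySem.List.enumerate cs0 0).foldl respellFirstStep PySem.Dict.empty).get? c ≠ some ((pre.length : Nat) : Int) := by
        rw [hF, if_neg hkey]
        simp
      rw [if_neg hcond]
      have hkeyf : respellDict.contains c = false := by simpa using hkey
      have hlkc : respellTable.lookup c = none := by
        rw [← dict_get?_eq_lookup]
        exact get?_none_of_not_contains hkeyf
      have hlk : (respellTable.filter (fun kv => !(pre.contains kv.1))).lookup c = none := by
        rw [lookup_filter_key (fun x => !(pre.contains x)) respellTable c]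
        rw [hlkc]
        simp
      simp only [goSpec, hlk]
      rw [List.singleton_append]
      congr 1
      rw [hlen, ih (pre ++ [c]) cs0 (by rw [h]; simp)]
      congr 1
      apply List.filter_congr
      intro kv hkv
      have hne : kv.1 ≠ c := fun he => by
        have := tableKeys kv hkv
        rw [he, hkeyf] at this
        exact Bool.false_ne_true this
      simp [hne]

-- ===== VERDICT (by name: the statement is the Claim_ definition above) =====
theorem respell_spec : Claim_equal_respell := by
  intro s _
  simp only [Spec_respell, respell, respell_alt]
  rw [foldl_eq_goSpec respellTable s.toList (by unfold CondT; decide)]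
  have h := emit_eq_goSpec s.toList [] s.toList rfl
  simp only [List.length_nil, Nat.cast_zero] at h
  rw [h, show (respellTable.filter (fun kv => !(([] : List Char).contains kv.1))) = respellTable from by simp]
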